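-- pv_equiv track=rewrite | github.com/ZhengjiangLin/AutoGrader | auto_grader_1/json_utils.py | _repair_json_invalid_backslashes
-- ===== SOURCE A (Python) =====
-- def _repair_json_invalid_backslashes(candidate: str) -> str:
--     # Valid JSON escape characters
--     valid_escapes = set('"\\/bfnrtu')
--     chars: list[str] = []
--     in_string = False
--     i = 0
--     n = len(candidate)
--
--     while i < n:
--         ch = candidate[i]
--
--         if ch == '"':
--             # Check if this quote is escaped
--             backslash_count = 0
--             j = i - 1
--             while j >= 0 and candidate[j] == "\\":
--                 backslash_count += 1
--                 j -= 1
--             if backslash_count % 2 == 0: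
--                 in_string = not in_string
--             chars.append(ch)
--             i += 1
--             continue
--
--         if in_string and ch == "\\":
--             if i + 1 >= n:
--                 chars.append("\\\\")
--                 i += 1
--                 continue
--
--             nxt = candidate[i + 1]
--             if nxt in valid_escapes:
--                 if nxt == "u":
--                     hex_part = candidate[i + 2 : i + 6]
--                     if len(hex_part) == 4 and all(c in "0123456789abcdefABCDEF" for c in hex_part):
--                         chars.append("\\")
--                     else:
--                         chars.append("\\\\")
--                 else:
--                     chars.append("\\")
--                 i += 1
--                 continue
--
--             # Invalid backslash → turn into double backslash
--             chars.append("\\\\")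
--             i += 1
--             continue
--
--         chars.append(ch)
--         i += 1
--
--     return "".join(chars)
-- ===== SOURCE B (Python) =====
-- def _find_from(s: str, c: str, i: int) -> int:
--     # position of the next c at or after i, or len(s) if there is none
--     j = s.find(c, i)
--     return len(s) if j == -1 else j
--
--
-- def _last_backslash_repair(s: str, j: int) -> str:
--     # Repair text for a backslash (inside a string) whose successor is s[j], or end of input.
--     if j >= len(s):
--         return "\\\\"
--     nxt = s[j]
--     if nxt in '"\\/bfnrtu':
--         if nxt == "u":
--             hp = s[j + 1 : j + 5]
--             if len(hp) == 4 and all(c in "0123456789abcdefABCDEF" for c in hp):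
--                 return "\\"
--             return "\\\\"
--         return "\\"
--     return "\\\\"
--
--
-- def _repair_json_invalid_backslashes(candidate: str) -> str:
--     # Block algorithm: bulk-copy every stretch without quotes/backslashes via
--     # find+slice, and consume each maximal backslash run at once ('\'*(k-1)
--     # plus a repair of the last one; a quote right after the run toggles the
--     # string state iff the run length k is even).
--     s = candidate
--     n = len(s)
--     out: list[str] = []
--     in_string = False
--     i = 0
--     while i < n:
--         j = min(_find_from(s, '"', i), _find_from(s, "\\", i))
--         if i < j:
--             out.append(s[i:j])
--             i = j
--         if i >= n:
--             break
--         if s[i] == '"':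
--             in_string = not in_string
--             out.append('"')
--             i += 1
--         else:
--             # maximal backslash run
--             j = i
--             while j < n and s[j] == "\\":
--                 j += 1
--             k = j - i
--             if in_string:
--                 out.append("\\" * (k - 1))
--                 out.append(_last_backslash_repair(s, j))
--             else:
--                 out.append("\\" * k)
--             i = j
--             if i < n and s[i] == '"':
--                 if k % 2 == 0:
--                     in_string = not in_string
--                 out.append('"')
--                 i += 1
--     return "".join(out)
-- ===== Notes on version B (the rewrite author's own statement) =====
-- stated objective: faster
-- what changed: B works in blocks: it bulk-copies every stretch free of quotes/backslashes with str.find+slice and consumes each maximal backslash run at once (emitting '\'*(k-1) plus one repaired last backslash, a following quote toggling via the run length's parity), replacing A's per-character state machine with a backward rescan at every quote.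
import Mathlib
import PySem

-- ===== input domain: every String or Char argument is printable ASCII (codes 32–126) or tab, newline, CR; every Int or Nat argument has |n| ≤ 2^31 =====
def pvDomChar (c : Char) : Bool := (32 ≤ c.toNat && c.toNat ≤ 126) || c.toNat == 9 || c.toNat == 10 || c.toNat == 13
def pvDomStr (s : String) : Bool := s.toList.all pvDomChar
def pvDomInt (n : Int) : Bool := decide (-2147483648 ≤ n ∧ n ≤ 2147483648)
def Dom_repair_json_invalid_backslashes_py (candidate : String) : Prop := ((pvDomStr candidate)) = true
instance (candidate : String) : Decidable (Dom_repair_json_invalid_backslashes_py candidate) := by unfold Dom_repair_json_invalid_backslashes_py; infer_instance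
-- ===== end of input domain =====

-- B works in blocks: it bulk-copies every stretch free of quotes/backslashes
-- (find + slice) and consumes each maximal backslash run at once, replacing A's
-- per-character scan with a backward rescan at every quote (objective: faster).

-- ===== PORT A =====
-- Python's 'nxt in valid_escapes' membership test
def pvValidEscape (c : Char) : Bool := ['"', '\\', '/', 'b', 'f', 'n', 'r', 't', 'u'].contains c
-- Python's 'c in "0123456789abcdefABCDEF"'
def pvHexDigit (c : Char) : Bool := "0123456789abcdefABCDEF".toList.contains c

-- inner while loop: 'j = i - 1; while j >= 0 and candidate[j] == "\\": count += 1; j -= 1'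
-- (argument is j+1, so 0 means j has gone below 0)
def pvCountBS (cs : List Char) : Nat → Nat → Nat
  | 0, count => count
  | j + 1, count => if cs.getD j ' ' == '\\' then pvCountBS cs j (count + 1) else count

-- the main 'while i < n' loop of A, state (i, in_string, chars); the loop advances i by 1
-- each iteration, so fuel n bounds the iteration count (structural port of the while loop)
def pvLoopA (cs : List Char) (n : Nat) : Nat → Nat → Bool → List Char → List Char
  | 0, _, _, acc => acc
  | fuel + 1, i, inStr, acc =>
    if i < n then
      let ch := cs.getD i ' '
      if ch == '"' then
        let bc := pvCountBS cs i 0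
        pvLoopA cs n fuel (i + 1) (if bc % 2 == 0 then !inStr else inStr) (acc ++ [ch])
      else if inStr && ch == '\\' then
        if n ≤ i + 1 then
          pvLoopA cs n fuel (i + 1) inStr (acc ++ ['\\', '\\'])
        else
          let nxt := cs.getD (i + 1) ' '
          if pvValidEscape nxt then
            if nxt == 'u' then
              -- candidate[i+2 : i+6]: exact for these nonnegative bounds (clamping take/drop)
              let hex := (cs.drop (i + 2)).take 4
              if hex.length == 4 && hex.all pvHexDigit then
                pvLoopA cs n fuel (i + 1) inStr (acc ++ [ch])
              else
                pvLoopA cs n fuel (i + 1) inStr (acc ++ ['\\', '\\'])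
            else
              pvLoopA cs n fuel (i + 1) inStr (acc ++ [ch])
          else
            pvLoopA cs n fuel (i + 1) inStr (acc ++ ['\\', '\\'])
      else
        pvLoopA cs n fuel (i + 1) inStr (acc ++ [ch])
    else acc

def repair_json_invalid_backslashes_py (candidate : String) : String :=
  String.ofList (pvLoopA candidate.toList candidate.toList.length candidate.toList.length 0 false [])

-- ===== PORT B =====
-- helper '_find_from(s, c, i)': position of the next c at or after i, or n if
-- none (a linear scan, exact for find's -1 mapped to n by the helper)
def pvFindFrom (cs : List Char) (n : Nat) (c : Char) : Nat → Nat → Nat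
  | 0, _ => n
  | fuel + 1, j => if j < n then (if cs.getD j ' ' == c then j else pvFindFrom cs n c fuel (j + 1)) else n

-- helper '_last_backslash_repair(s, j)': repair text for a backslash (inside a
-- string) whose successor is s[j], or end of input
def pvLastRepair (cs : List Char) (j : Nat) : List Char :=
  if cs.length ≤ j then ['\\', '\\']
  else
    if pvValidEscape (cs.getD j ' ') then
      if cs.getD j ' ' == 'u' then
        -- s[j+1 : j+5]
        if ((cs.drop (j + 1)).take 4).length == 4 && ((cs.drop (j + 1)).take 4).all pvHexDigit
        then ['\\'] else ['\\', '\\']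
      else ['\\']
    else ['\\', '\\']

-- inner 'while j < n and s[j] == "\\": j += 1' (returns the end index of the run)
def pvRunEnd (cs : List Char) (n : Nat) : Nat → Nat → Nat
  | 0, j => j
  | fuel + 1, j => if j < n ∧ cs.getD j ' ' == '\\' then pvRunEnd cs n fuel (j + 1) else j

-- B's outer 'while i < n' loop: one iteration per block — a bulk-copied plain
-- stretch followed by either a quote or a whole backslash run (which may
-- absorb a directly following quote)
def pvLoopB (cs : List Char) (n : Nat) : Nat → Nat → Bool → List Char → List Char
  | 0, _, _, acc => acc
  | fuel + 1, i, inStr, acc =>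
    if i < n then
      let j := min (pvFindFrom cs n '"' (n - i) i) (pvFindFrom cs n '\\' (n - i) i)
      let acc0 := if i < j then acc ++ (cs.drop i).take (j - i) else acc
      if n ≤ j then acc0
      else if cs.getD j ' ' == '"' then
        pvLoopB cs n fuel (j + 1) (!inStr) (acc0 ++ ['"'])
      else
        let jr := pvRunEnd cs n (n - j) j
        let k := jr - j
        let acc1 :=
          if inStr then acc0 ++ List.replicate (k - 1) '\\' ++ pvLastRepair cs jr
          else acc0 ++ List.replicate k '\\'
        if jr < n ∧ cs.getD jr ' ' == '"' then
          pvLoopB cs n fuel (jr + 1) (if k % 2 == 0 then !inStr else inStr) (acc1 ++ ['"'])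
        else pvLoopB cs n fuel jr inStr acc1
    else acc

def repair_json_invalid_backslashes_py_alt (candidate : String) : String :=
  String.ofList (pvLoopB candidate.toList candidate.toList.length candidate.toList.length 0 false [])

-- ===== PRECONDITION & SPEC =====
def Spec_repair_json_invalid_backslashes_py (candidate : String) (out : String) : Prop := out = repair_json_invalid_backslashes_py_alt candidate
instance (candidate : String) (out : String) : Decidable (Spec_repair_json_invalid_backslashes_py candidate out) := by unfold Spec_repair_json_invalid_backslashes_py; infer_instance

-- ===== CLAIM (what is proved, stated in full; the proofs are below) =====
def Claim_equal_repair_json_invalid_backslashes_py : Prop := ∀ (candidate : String), Dom_repair_json_invalid_backslashes_py candidate → Spec_repair_json_invalid_backslashes_py candidate (repair_json_invalid_backslashes_py candidate)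

-- ===== LEMMAS AND PROOFS =====

-- the accumulator of the backward scan shifts out
lemma pvCountBS_shift (cs : List Char) : ∀ j c, pvCountBS cs j c = pvCountBS cs j 0 + c := by
  intro j
  induction j with
  | zero => intro c; simp [pvCountBS]
  | succ j ih =>
    intro c
    rw [pvCountBS, pvCountBS]
    by_cases h : cs.getD j ' ' == '\\'
    · rw [if_pos h, if_pos h, ih (c + 1), ih (0 + 1)]; omega
    · rw [if_neg h, if_neg h]; omega

lemma pvCountBS_succ (cs : List Char) (i : Nat) :
    pvCountBS cs (i + 1) 0 = (if cs.getD i ' ' == '\\' then pvCountBS cs i 0 + 1 else 0) := by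
  rw [pvCountBS]
  by_cases h : cs.getD i ' ' == '\\'
  · rw [if_pos h, if_pos h, pvCountBS_shift]
  · rw [if_neg h, if_neg h]

-- count over a backslash run starting from a clean position
lemma pvCountBS_run (cs : List Char) (i k : Nat) (h0 : pvCountBS cs i 0 = 0)
    (hrun : ∀ t, t < k → cs.getD (i + t) ' ' = '\\') :
    ∀ t, t ≤ k → pvCountBS cs (i + t) 0 = t := by
  intro t
  induction t with
  | zero => intro _; simpa using h0
  | succ t ih =>
    intro ht
    have hc : cs.getD (i + t) ' ' = '\\' := hrun t (by omega)
    rw [show i + (t + 1) = (i + t) + 1 by omega, pvCountBS_succ, hc]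
    simp [ih (by omega)]

lemma pvLoopA_stop (cs : List Char) (n : Nat) (f i : Nat) (s : Bool) (acc : List Char)
    (h : ¬ i < n) : pvLoopA cs n f i s acc = acc := by
  cases f <;> simp [pvLoopA, h]

lemma pvLoopB_stop (cs : List Char) (n : Nat) (f i : Nat) (s : Bool) (acc : List Char)
    (h : ¬ i < n) : pvLoopB cs n f i s acc = acc := by
  cases f <;> simp [pvLoopB, h]

-- pvRunEnd's specification: the result r satisfies i ≤ r ≤ n, every char in
-- [i, r) is a backslash, and cs[r] is not a backslash if r < n
lemma pvRunEnd_spec (cs : List Char) (n : Nat) : ∀ f i, i ≤ n → n - i ≤ f →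
    i ≤ pvRunEnd cs n f i ∧ pvRunEnd cs n f i ≤ n ∧
      (∀ t, i ≤ t → t < pvRunEnd cs n f i → cs.getD t ' ' = '\\') ∧
      (pvRunEnd cs n f i < n → ¬ cs.getD (pvRunEnd cs n f i) ' ' = '\\') := by
  intro f
  induction f with
  | zero =>
    intro i hin hf
    have hr : pvRunEnd cs n 0 i = i := rfl
    rw [hr]
    exact ⟨le_refl _, hin, fun t h1 h2 => absurd h2 (by omega), fun h => by omega⟩
  | succ f ih =>
    intro i hin hf
    have hstep : pvRunEnd cs n (f + 1) i
        = if i < n ∧ cs.getD i ' ' == '\\' then pvRunEnd cs n f (i + 1) else i := rfl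
    by_cases h : i < n ∧ cs.getD i ' ' == '\\'
    · rw [hstep, if_pos h]
      obtain ⟨h1, h2, h3, h4⟩ := ih (i + 1) (by omega) (by omega)
      refine ⟨by omega, h2, ?_, h4⟩
      intro t hti htr
      by_cases hti' : i + 1 ≤ t
      · exact h3 t hti' htr
      · have : t = i := by omega
        subst this; exact eq_of_beq h.2
    · rw [hstep, if_neg h]
      refine ⟨le_refl _, hin, fun t h1 h2 => absurd h2 (by omega), ?_⟩
      intro hlt hc
      exact h ⟨hlt, beq_iff_eq.mpr hc⟩

-- what A emits for one in-string backslash at i (proof-only helper)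
def pvEmitA (cs : List Char) (n i : Nat) : List Char :=
  if n ≤ i + 1 then ['\\', '\\']
  else
    if pvValidEscape (cs.getD (i + 1) ' ') then
      if cs.getD (i + 1) ' ' == 'u' then
        if ((cs.drop (i + 2)).take 4).length == 4 && ((cs.drop (i + 2)).take 4).all pvHexDigit
        then ['\\'] else ['\\', '\\']
      else ['\\']
    else ['\\', '\\']

lemma pvEmitA_eq_lastRepair (cs : List Char) (i : Nat) :
    pvEmitA cs cs.length i = pvLastRepair cs (i + 1) := rfl

lemma pvEmitA_bs (cs : List Char) (n i : Nat) (h : i + 1 < n)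
    (hc : cs.getD (i + 1) ' ' = '\\') : pvEmitA cs n i = ['\\'] := by
  unfold pvEmitA
  rw [if_neg (by omega), hc]
  simp [pvValidEscape]

-- one-step unfoldings of A's loop
lemma pvLoopA_step_quote (cs : List Char) (n f i : Nat) (inStr : Bool) (acc : List Char)
    (hi : i < n) (hq : cs.getD i ' ' = '"') :
    pvLoopA cs n (f + 1) i inStr acc
      = pvLoopA cs n f (i + 1)
          (if pvCountBS cs i 0 % 2 == 0 then !inStr else inStr) (acc ++ ['"']) := by
  simp only [pvLoopA, if_pos hi, hq]
  norm_num

lemma pvLoopA_step_bs (cs : List Char) (n f i : Nat) (acc : List Char)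
    (hi : i < n) (hc : cs.getD i ' ' = '\\') :
    pvLoopA cs n (f + 1) i true acc = pvLoopA cs n f (i + 1) true (acc ++ pvEmitA cs n i) := by
  simp only [pvLoopA, if_pos hi, hc]
  rw [show (('\\' : Char) == '"') = false from by decide]
  simp only [Bool.false_eq_true, if_false, Bool.true_and, beq_self_eq_true, if_true]
  unfold pvEmitA
  split_ifs <;> rfl

lemma pvLoopA_step_other (cs : List Char) (n f i : Nat) (inStr : Bool) (acc : List Char)
    (hi : i < n) (hq : ¬ cs.getD i ' ' = '"')
    (hbs : inStr = false ∨ ¬ cs.getD i ' ' = '\\') :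
    pvLoopA cs n (f + 1) i inStr acc
      = pvLoopA cs n f (i + 1) inStr (acc ++ [cs.getD i ' ']) := by
  simp only [pvLoopA, if_pos hi]
  rw [if_neg (by simp only [beq_iff_eq]; exact hq)]
  rw [if_neg ?_]
  simp only [Bool.and_eq_true, beq_iff_eq]
  rcases hbs with h | h
  · rintro ⟨h', -⟩; rw [h] at h'; cases h'
  · exact fun hh => h hh.2

-- A copies a backslash run verbatim while not in a string
lemma pvLoopA_run_out (cs : List Char) (n : Nat) : ∀ k i f acc,
    i + k ≤ n → (∀ t, t < k → cs.getD (i + t) ' ' = '\\') →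
    pvLoopA cs n (f + k) i false acc
      = pvLoopA cs n f (i + k) false (acc ++ List.replicate k '\\') := by
  intro k
  induction k with
  | zero => intro i f acc _ _; simp
  | succ k ih =>
    intro i f acc hkn hrun
    have hc : cs.getD i ' ' = '\\' := by simpa using hrun 0 (by omega)
    rw [show f + (k + 1) = (f + k) + 1 by omega,
        pvLoopA_step_other cs n (f + k) i false acc (by omega) (by rw [hc]; decide)
          (Or.inl rfl), hc]
    rw [ih (i + 1) f (acc ++ ['\\']) (by omega)
        (fun t ht => by have := hrun (t + 1) (by omega); rwa [show i + 1 + t = i + (t + 1) by omega])]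
    rw [show i + 1 + k = i + (k + 1) by omega, List.replicate_succ]
    simp

-- A's pass over an in-string backslash run of length k ≥ 1: every backslash but
-- the last escapes the next backslash, the last one gets pvEmitA's repair
lemma pvLoopA_run_in (cs : List Char) (n : Nat) : ∀ k i f acc,
    1 ≤ k → i + k ≤ n → (∀ t, t < k → cs.getD (i + t) ' ' = '\\') →
    pvLoopA cs n (f + k) i true acc
      = pvLoopA cs n f (i + k) true
          (acc ++ List.replicate (k - 1) '\\' ++ pvEmitA cs n (i + k - 1)) := by
  intro k
  induction k with
  | zero => intro i f acc h1; omega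
  | succ k ih =>
    intro i f acc _ hkn hrun
    have hc : cs.getD i ' ' = '\\' := by simpa using hrun 0 (by omega)
    rw [show f + (k + 1) = (f + k) + 1 by omega,
        pvLoopA_step_bs cs n (f + k) i acc (by omega) hc]
    cases Nat.eq_zero_or_pos k with
    | inl hk0 =>
      subst hk0
      simp
    | inr hkpos =>
      have hnxt : cs.getD (i + 1) ' ' = '\\' := by simpa using hrun 1 (by omega)
      rw [pvEmitA_bs cs n i (by omega) hnxt]
      rw [ih (i + 1) f (acc ++ ['\\']) (by omega) (by omega)
        (fun t ht => by have := hrun (t + 1) (by omega); rwa [show i + 1 + t = i + (t + 1) by omega])]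
      rw [show i + 1 + k = i + (k + 1) by omega]
      congr 2
      rw [show k + 1 - 1 = (k - 1) + 1 by omega, List.replicate_succ]
      simp

-- pvFindFrom's specification: the result r is the first position in [j, n)
-- holding c, or n if there is none
lemma pvFindFrom_spec (cs : List Char) (n : Nat) (c : Char) : ∀ f j, j ≤ n → n - j ≤ f →
    j ≤ pvFindFrom cs n c f j ∧ pvFindFrom cs n c f j ≤ n ∧
      (∀ t, j ≤ t → t < pvFindFrom cs n c f j → ¬ cs.getD t ' ' = c) ∧
      (pvFindFrom cs n c f j < n → cs.getD (pvFindFrom cs n c f j) ' ' = c) := by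
  intro f
  induction f with
  | zero =>
    intro j hjn hf
    have hr : pvFindFrom cs n c 0 j = n := rfl
    rw [hr]
    exact ⟨hjn, le_refl _, fun t h1 h2 => absurd h2 (by omega), fun h => by omega⟩
  | succ f ih =>
    intro j hjn hf
    have hstep : pvFindFrom cs n c (f + 1) j
        = if j < n then (if cs.getD j ' ' == c then j else pvFindFrom cs n c f (j + 1)) else n := rfl
    by_cases hj : j < n
    · by_cases hc : cs.getD j ' ' == c
      · rw [hstep, if_pos hj, if_pos hc]
        exact ⟨le_refl _, by omega, fun t h1 h2 => absurd h2 (by omega),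
          fun _ => eq_of_beq hc⟩
      · rw [hstep, if_pos hj, if_neg hc]
        obtain ⟨h1, h2, h3, h4⟩ := ih (j + 1) (by omega) (by omega)
        refine ⟨by omega, h2, ?_, h4⟩
        intro t hti htr
        by_cases ht' : j + 1 ≤ t
        · exact h3 t ht' htr
        · have : t = j := by omega
          subst this
          exact fun hh => hc (beq_iff_eq.mpr hh)
    · rw [hstep, if_neg hj]
      exact ⟨by omega, le_refl _, fun t h1 h2 => absurd h2 (by omega), fun h => by omega⟩

-- A copies a stretch with no quotes and no backslashes verbatim
lemma pvLoopA_seg (cs : List Char) (n : Nat) (hcs : n ≤ cs.length) : ∀ m i f acc inStr,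
    i + m ≤ n →
    (∀ t, t < m → ¬ cs.getD (i + t) ' ' = '"' ∧ ¬ cs.getD (i + t) ' ' = '\\') →
    pvLoopA cs n (f + m) i inStr acc
      = pvLoopA cs n f (i + m) inStr (acc ++ (cs.drop i).take m) := by
  intro m
  induction m with
  | zero => intro i f acc inStr _ _; simp
  | succ m ih =>
    intro i f acc inStr hmn hseg
    have h0 := hseg 0 (by omega)
    simp only [Nat.add_zero] at h0
    rw [show f + (m + 1) = (f + m) + 1 by omega,
        pvLoopA_step_other cs n (f + m) i inStr acc (by omega) h0.1 (Or.inr h0.2)]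
    rw [ih (i + 1) f (acc ++ [cs.getD i ' ']) inStr (by omega)
        (fun t ht => by have := hseg (t + 1) (by omega); rwa [show i + 1 + t = i + (t + 1) by omega])]
    rw [show i + 1 + m = i + (m + 1) by omega]
    congr 1
    have hi : i < cs.length := by omega
    rw [List.drop_eq_getElem_cons hi, List.take_succ_cons,
        show cs.getD i ' ' = cs[i] from by simp [List.getD, List.getElem?_eq_getElem hi]]
    simp

-- main equivalence: B's block loop computes exactly A's per-character loop.
-- Invariant: either no backslash immediately precedes i, or cs[i] is a plain
-- character (neither backslash nor quote, where the count is irrelevant).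
lemma pvLoop_eq (cs : List Char) : ∀ fB i inStr acc fA,
    cs.length - i ≤ fB → cs.length - i ≤ fA →
    (pvCountBS cs i 0 = 0 ∨ (¬ cs.getD i ' ' = '\\' ∧ ¬ cs.getD i ' ' = '"')) →
    pvLoopA cs cs.length fA i inStr acc = pvLoopB cs cs.length fB i inStr acc := by
  intro fB
  induction fB with
  | zero =>
    intro i inStr acc fA hfB hfA _
    rw [pvLoopA_stop cs cs.length fA i inStr acc (by omega),
        pvLoopB_stop cs cs.length 0 i inStr acc (by omega)]
  | succ fB ih =>
    intro i inStr acc fA hfA' hfA hinv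
    by_cases hi : i < cs.length
    case neg =>
      rw [pvLoopA_stop _ _ _ _ _ _ hi, pvLoopB_stop _ _ _ _ _ _ hi]
    case pos =>
    -- the bulk-copied plain stretch [i, j)
    obtain ⟨hq1, hq2, hq3, hq4⟩ :=
      pvFindFrom_spec cs cs.length '"' (cs.length - i) i (by omega) (by omega)
    obtain ⟨hb1, hb2, hb3, hb4⟩ :=
      pvFindFrom_spec cs cs.length '\\' (cs.length - i) i (by omega) (by omega)
    set jq := pvFindFrom cs cs.length '"' (cs.length - i) i with hjq
    set jb := pvFindFrom cs cs.length '\\' (cs.length - i) i with hjb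
    set j := min jq jb with hjdef
    have hij : i ≤ j := le_min hq1 hb1
    have hjn : j ≤ cs.length := le_trans (min_le_left _ _) hq2
    have hseg : ∀ t, t < j - i → ¬ cs.getD (i + t) ' ' = '"' ∧ ¬ cs.getD (i + t) ' ' = '\\' :=
      fun t ht => ⟨hq3 (i + t) (by omega) (by omega), hb3 (i + t) (by omega) (by omega)⟩
    have hm : i + (j - i) = j := by omega
    -- step A over the stretch
    have hAseg : pvLoopA cs cs.length fA i inStr acc
        = pvLoopA cs cs.length (fA - (j - i)) j inStr (acc ++ (cs.drop i).take (j - i)) := by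
      have hstep := pvLoopA_seg cs cs.length (le_refl _) (j - i) i (fA - (j - i)) acc inStr (by omega) hseg
      rw [show (fA - (j - i)) + (j - i) = fA by omega, hm] at hstep
      exact hstep
    -- the invariant transported to j
    have h0 : j < cs.length → pvCountBS cs j 0 = 0 := by
      intro hjlt
      by_cases hji : i < j
      · have hlast := hseg (j - i - 1) (by omega)
        rw [show i + (j - i - 1) = j - 1 by omega] at hlast
        rw [show j = (j - 1) + 1 by omega, pvCountBS_succ,
            if_neg (by simp only [beq_iff_eq]; exact hlast.2)]
      · have hji' : j = i := by omega
        rcases hinv with h | h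
        · rwa [hji']
        · exfalso
          rcases min_cases jq jb with ⟨he, -⟩ | ⟨he, -⟩
          · have hjq' : jq = i := by omega
            exact h.2 (by rw [← hjq']; exact hq4 (by omega))
          · have hjb' : jb = i := by omega
            exact h.1 (by rw [← hjb']; exact hb4 (by omega))
    -- unfold one iteration of B
    have hBstep : pvLoopB cs cs.length (fB + 1) i inStr acc
        = (let acc0 := acc ++ (cs.drop i).take (j - i)
           if cs.length ≤ j then acc0
           else if cs.getD j ' ' == '"' then
             pvLoopB cs cs.length fB (j + 1) (!inStr) (acc0 ++ ['"'])
           else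
             let jr := pvRunEnd cs cs.length (cs.length - j) j
             let k := jr - j
             let acc1 :=
               if inStr then acc0 ++ List.replicate (k - 1) '\\' ++ pvLastRepair cs jr
               else acc0 ++ List.replicate k '\\'
             if jr < cs.length ∧ cs.getD jr ' ' == '"' then
               pvLoopB cs cs.length fB (jr + 1) (if k % 2 == 0 then !inStr else inStr) (acc1 ++ ['"'])
             else pvLoopB cs cs.length fB jr inStr acc1) := by
      simp only [pvLoopB, if_pos hi, ← hjq, ← hjb, ← hjdef]
      have hacc0 : (if i < j then acc ++ (cs.drop i).take (j - i) else acc)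
          = acc ++ (cs.drop i).take (j - i) := by
        by_cases h : i < j
        · rw [if_pos h]
        · rw [if_neg h, show j - i = 0 by omega]
          simp
      rw [hacc0]
    rw [hBstep, hAseg]
    set acc0 := acc ++ (cs.drop i).take (j - i) with hacc0
    by_cases hjend : cs.length ≤ j
    · rw [if_pos hjend, pvLoopA_stop _ _ _ _ _ _ (by omega)]
    · rw [if_neg hjend]
      have hjlt : j < cs.length := by omega
      have h0' := h0 hjlt
      have hspecial : cs.getD j ' ' = '"' ∨ cs.getD j ' ' = '\\' := by
        rcases min_cases jq jb with ⟨he, -⟩ | ⟨he, -⟩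
        · have : j = jq := by omega
          exact Or.inl (by rw [this]; exact hq4 (by omega))
        · have : j = jb := by omega
          exact Or.inr (by rw [this]; exact hb4 (by omega))
      by_cases hquote : cs.getD j ' ' = '"'
      · -- quote directly after the stretch: no preceding backslash, both toggle
        rw [if_pos (beq_iff_eq.mpr hquote)]
        obtain ⟨fA', hfAeq⟩ : ∃ f, fA - (j - i) = f + 1 := ⟨fA - (j - i) - 1, by omega⟩
        rw [hfAeq, pvLoopA_step_quote cs cs.length fA' j inStr acc0 hjlt hquote, h0']
        norm_num
        exact ih (j + 1) _ _ fA' (by omega) (by omega)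
          (Or.inl (by rw [pvCountBS_succ, hquote]; simp))
      · -- backslash run starting at j
        rw [if_neg (by simp only [beq_iff_eq]; exact hquote)]
        have hbs : cs.getD j ' ' = '\\' := hspecial.resolve_left hquote
        obtain ⟨hij2, hjn2, hrunc, hend⟩ :=
          pvRunEnd_spec cs cs.length (cs.length - j) j (by omega) (by omega)
        set jr := pvRunEnd cs cs.length (cs.length - j) j with hjr
        have hjgt : j < jr := by
          rcases Nat.lt_or_ge j jr with h | h
          · exact h
          · have hji : jr = j := by omega
            exact absurd (hji ▸ hbs) (hend (by omega))
        set k := jr - j with hk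
        have hkrun : ∀ t, t < k → cs.getD (j + t) ' ' = '\\' :=
          fun t ht => hrunc (j + t) (by omega) (by omega)
        have hcount : pvCountBS cs jr 0 = k := by
          have := pvCountBS_run cs j k h0' hkrun k (le_refl _)
          rwa [show j + k = jr by omega] at this
        -- step A over the run up to jr
        have hArun : pvLoopA cs cs.length (fA - (j - i)) j inStr acc0
            = pvLoopA cs cs.length (fA - (j - i) - k) jr inStr
                (if inStr then acc0 ++ List.replicate (k - 1) '\\' ++ pvLastRepair cs jr
                 else acc0 ++ List.replicate k '\\') := by
          cases inStr with
          | true =>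
            have hstep := pvLoopA_run_in cs cs.length k j (fA - (j - i) - k) acc0
              (by omega) (by omega) hkrun
            rw [show (fA - (j - i) - k) + k = fA - (j - i) by omega] at hstep
            rw [hstep, if_pos rfl, pvEmitA_eq_lastRepair,
                show j + k - 1 + 1 = jr by omega, show j + k = jr by omega]
          | false =>
            have hstep := pvLoopA_run_out cs cs.length k j (fA - (j - i) - k) acc0
              (by omega) hkrun
            rw [show (fA - (j - i) - k) + k = fA - (j - i) by omega] at hstep
            rw [hstep, if_neg (by simp), show j + k = jr by omega]
        rw [hArun]
        set acc1 := if inStr = true then acc0 ++ List.replicate (k - 1) '\\' ++ pvLastRepair cs jr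
                    else acc0 ++ List.replicate k '\\' with hacc1
        by_cases hq : jr < cs.length ∧ cs.getD jr ' ' = '"'
        · rw [if_pos (by exact ⟨hq.1, by exact beq_iff_eq.mpr hq.2⟩)]
          obtain ⟨fA', hfAeq⟩ : ∃ f, fA - (j - i) - k = f + 1 := ⟨fA - (j - i) - k - 1, by omega⟩
          rw [hfAeq, pvLoopA_step_quote cs cs.length fA' jr inStr acc1 hq.1 hq.2, hcount]
          exact ih (jr + 1) _ _ fA' (by omega) (by omega)
            (Or.inl (by rw [pvCountBS_succ, hq.2]; simp))
        · rw [if_neg (by intro h; exact hq ⟨h.1, by simpa using h.2⟩)]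
          by_cases hjrlt : jr < cs.length
          · exact ih jr inStr acc1 (fA - (j - i) - k) (by omega) (by omega)
              (Or.inr ⟨hend hjrlt, fun h => hq ⟨hjrlt, h⟩⟩)
          · rw [pvLoopA_stop _ _ _ _ _ _ hjrlt, pvLoopB_stop _ _ _ _ _ _ hjrlt]

-- ===== VERDICT (by name: the statement is the Claim_ definition above) =====
theorem repair_json_invalid_backslashes_py_spec : Claim_equal_repair_json_invalid_backslashes_py := by
  intro candidate _
  unfold Spec_repair_json_invalid_backslashes_py
  unfold repair_json_invalid_backslashes_py repair_json_invalid_backslashes_py_alt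
  rw [pvLoop_eq candidate.toList candidate.toList.length 0 false [] candidate.toList.length
    (by omega) (by omega) (Or.inl (by cases candidate.toList <;> simp [pvCountBS]))]
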